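-- pv_equiv track=rewrite | github.com/Greek-Fire/vm_facts | scripts/vlan_mapping.py | sort_dicts
-- ===== SOURCE A (Python) =====
-- def sort_dicts(dicts):
--     """
--     Sort the list of dictionaries by the number of key-value pair matches.
--
--     Returns:
--     - A list of sorted dictionaries.
--     """
--     count_dict = {}
--     # Count occurrences of each dictionary
--     for d1 in dicts:
--         d1_tuple = tuple(sorted(d1.items()))
--         for d2 in dicts:
--             if d1 != d2:
--                 count = sum(1 for k, v in d1.items() if k in d2 and d2[k] == v)
--                 if d1_tuple not in count_dict:
--                     count_dict[d1_tuple] = count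
--                 else:
--                     count_dict[d1_tuple] += count
--
--     # Sort the dictionaries by count
--     sorted_dicts = sorted(dicts, key=lambda d: count_dict[tuple(sorted(d.items()))], reverse=False)
--     return sorted_dicts
-- ===== SOURCE B (Python) =====
-- def sort_dicts(dicts):
--     """
--     Sort the list of dictionaries by the number of key-value pair matches.
--
--     Returns:
--     - A list of sorted dictionaries.
--     """
--     # frequency of each (key, value) pair across all dicts
--     freq = {}
--     for d in dicts:
--         for kv in d.items():
--             freq[kv] = freq.get(kv, 0) + 1
--     # multiplicity of each dictionary (as a canonical sorted-items tuple)
--     mult = {}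
--     for d in dicts:
--         t = tuple(sorted(d.items()))
--         mult[t] = mult.get(t, 0) + 1
--     def score(d):
--         m = mult[tuple(sorted(d.items()))]
--         return m * sum(freq[kv] - m for kv in d.items())
--     return sorted(dicts, key=score)
-- ===== Notes on version B (the rewrite author's own statement) =====
-- stated objective: faster
-- what changed: Replaces A's O(n^2) all-pairs dict-vs-dict matching with one pass that hash-counts the frequency of every (key,value) pair and the multiplicity of every dict, then scores each dict by multiplicity * (sum of pair frequencies minus a self-multiplicity correction) before the same stable sort.
import Mathlib
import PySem

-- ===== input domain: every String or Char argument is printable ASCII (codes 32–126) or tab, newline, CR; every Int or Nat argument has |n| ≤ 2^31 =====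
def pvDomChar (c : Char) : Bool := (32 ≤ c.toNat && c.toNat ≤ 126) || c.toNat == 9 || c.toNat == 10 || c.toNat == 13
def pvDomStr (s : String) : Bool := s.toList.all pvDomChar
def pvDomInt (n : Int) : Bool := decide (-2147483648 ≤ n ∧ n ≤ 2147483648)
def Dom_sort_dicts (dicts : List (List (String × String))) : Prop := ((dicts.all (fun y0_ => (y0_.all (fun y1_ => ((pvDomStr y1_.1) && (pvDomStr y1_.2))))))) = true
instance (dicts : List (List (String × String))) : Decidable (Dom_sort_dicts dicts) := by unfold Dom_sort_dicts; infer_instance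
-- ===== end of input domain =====

-- B replaces A's O(n^2) all-pairs dict matching by hash counts of (key,value)-pair frequencies
-- and dict multiplicities, scoring each dict in one pass before the same stable sort (faster).


-- ===== PORT A =====
-- shared input reading: each association list denotes the Python dict built from it
-- (dict(pairs): last value wins, first insertion position kept) — PySem.Dict.insert folding
def pvToDict (l : List (String × String)) : PySem.Dict String String :=
  l.foldl (fun d p => d.insert p.1 p.2) PySem.Dict.empty

-- tuple(sorted(d.items())): Python sorts (str, str) tuples lexicographically = sorted2
def pvSKey (d : PySem.Dict String String) : List (String × String) :=
  PySem.List.sorted2 d.items Prod.fst Prod.snd false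

-- sum(1 for k, v in d1.items() if k in d2 and d2[k] == v)
def pvMatch (d1 d2 : PySem.Dict String String) : Int :=
  ((d1.items.countP (fun p => d2.get? p.1 == some p.2) : Nat) : Int)

-- Python's 'd1 != d2' on dicts (order-insensitive mapping equality) is, for unique-key dicts,
-- exactly inequality of the sorted item lists; ported as the decidable sorted-items comparison.
def sort_dicts (dicts : List (List (String × String))) : List (List (String × String)) :=
  let ds := dicts.map pvToDict
  let cd : PySem.Dict (List (String × String)) Int :=
    ds.foldl (fun cd d1 =>
      ds.foldl (fun cd d2 =>
        if pvSKey d1 == pvSKey d2 then cd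
        else
          if !cd.contains (pvSKey d1) then cd.insert (pvSKey d1) (pvMatch d1 d2)
          else cd.modify (pvSKey d1) 0 (· + pvMatch d1 d2)) cd)
      PySem.Dict.empty
  -- count_dict[tuple(sorted(d.items()))]: under Pre_ the key is always present, so getD _ 0 is exact
  (PySem.List.sorted ds (fun d => cd.getD (pvSKey d) 0) false).map (·.items)

-- ===== PORT B =====
def sort_dicts_alt (dicts : List (List (String × String))) : List (List (String × String)) :=
  let ds := dicts.map pvToDict
  let freq : PySem.Dict (String × String) Int :=
    ds.foldl (fun f d => d.items.foldl (fun f kv => f.insert kv (f.getD kv 0 + 1)) f)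
      PySem.Dict.empty
  let mult : PySem.Dict (List (String × String)) Int :=
    ds.foldl (fun m d => m.insert (pvSKey d) (m.getD (pvSKey d) 0 + 1)) PySem.Dict.empty
  (PySem.List.sorted ds (fun d =>
      mult.getD (pvSKey d) 0 *
        (d.items.map (fun kv => freq.getD kv 0 - mult.getD (pvSKey d) 0)).sum) false).map (·.items)

-- ===== PRECONDITION & SPEC =====
-- Pre_ excludes exactly the inputs where A raises KeyError: a non-empty list whose dicts are all
-- equal (then 'd1 != d2' never holds, count_dict stays empty, and the sort key lookup raises).
def Pre_sort_dicts (dicts : List (List (String × String))) : Prop :=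
  dicts = [] ∨ ∃ l ∈ dicts, pvSKey (pvToDict l) ≠ pvSKey (pvToDict dicts.headI)
instance (dicts : List (List (String × String))) : Decidable (Pre_sort_dicts dicts) := by unfold Pre_sort_dicts; infer_instance

def pvWitness_sort_dicts : (List (List (String × String))) := [[("a","x")], [("b","y")]]

def Spec_sort_dicts (dicts : List (List (String × String))) (out : List (List (String × String))) : Prop := out = sort_dicts_alt dicts
instance (dicts : List (List (String × String))) (out : List (List (String × String))) : Decidable (Spec_sort_dicts dicts out) := by unfold Spec_sort_dicts; infer_instance

-- ===== CLAIM (what is proved, stated in full; the proofs are below) =====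
def Claim_equal_sort_dicts : Prop := ∀ (dicts : List (List (String × String))), Dom_sort_dicts dicts → Pre_sort_dicts dicts → Spec_sort_dicts dicts (sort_dicts dicts)

-- ===== LEMMAS AND PROOFS =====
-- one write step of A's count_dict
theorem pv_getD_write (cd : PySem.Dict (List (String × String)) Int)
    (t0 t : List (String × String)) (c : Int) :
    (if !cd.contains t0 then cd.insert t0 c else cd.modify t0 0 (· + c)).getD t 0
      = cd.getD t 0 + (if t = t0 then c else 0) := by
  by_cases hc : cd.contains t0
  · simp only [hc, Bool.not_true, Bool.false_eq_true, if_false, PySem.Dict.getD_modify]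
    split_ifs with h
    · subst h; ring
    · ring
  · have hc' : cd.contains t0 = false := by simpa using hc
    have h0 : cd.getD t0 0 = 0 := PySem.Dict.getD_of_not_contains cd 0 hc'
    simp only [hc', Bool.not_false, if_true, PySem.Dict.getD_insert]
    split_ifs with h
    · subst h; rw [h0]; ring
    · ring

-- the inner loop writes only at key t0, adding the skipped-filtered sum
theorem pv_inner (q : PySem.Dict String String → Bool)
    (f : PySem.Dict String String → Int) (t0 t : List (String × String)) :
    ∀ (l : List (PySem.Dict String String)) (cd : PySem.Dict (List (String × String)) Int),
    (l.foldl (fun cd x => if q x then cd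
        else if !cd.contains t0 then cd.insert t0 (f x) else cd.modify t0 0 (· + f x)) cd).getD t 0
      = cd.getD t 0 + (if t = t0 then (l.map (fun x => if q x then 0 else f x)).sum else 0) := by
  intro l
  induction l with
  | nil => intro cd; simp
  | cons x tl ih =>
    intro cd
    simp only [List.foldl_cons, List.map_cons, List.sum_cons]
    by_cases hq : q x
    · rw [ih]; simp [hq]
    · simp only [hq, Bool.false_eq_true, if_false]
      rw [ih, pv_getD_write]
      split_ifs with h <;> ring

-- per-dict total of A's inner loop
def pvS (ds : List (PySem.Dict String String)) (d1 : PySem.Dict String String) : Int :=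
  (ds.map (fun x => if pvSKey d1 == pvSKey x then 0 else pvMatch d1 x)).sum

theorem pv_outer (ds0 : List (PySem.Dict String String)) (t : List (String × String)) :
    ∀ (l : List (PySem.Dict String String)) (cd : PySem.Dict (List (String × String)) Int),
    (l.foldl (fun cd d1 =>
        ds0.foldl (fun cd d2 => if pvSKey d1 == pvSKey d2 then cd
          else if !cd.contains (pvSKey d1) then cd.insert (pvSKey d1) (pvMatch d1 d2)
          else cd.modify (pvSKey d1) 0 (· + pvMatch d1 d2)) cd) cd).getD t 0
      = cd.getD t 0 + (l.map (fun d1 => if t = pvSKey d1 then pvS ds0 d1 else 0)).sum := by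
  intro l
  induction l with
  | nil => intro cd; simp
  | cons x tl ih =>
    intro cd
    simp only [List.foldl_cons, List.map_cons, List.sum_cons]
    rw [ih, pv_inner (fun d2 => pvSKey x == pvSKey d2) (pvMatch x) (pvSKey x) t ds0 cd]
    unfold pvS
    split_ifs with h <;> ring

-- sums of constant-on-the-support if-maps
theorem pv_sum_ite_const {α : Type} (l : List α) (p : α → Prop) [DecidablePred p]
    (g : α → Int) (c : Int) (h : ∀ x ∈ l, p x → g x = c) :
    (l.map (fun x => if p x then g x else 0)).sum
      = ((l.countP (fun x => decide (p x)) : Nat) : Int) * c := by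
  induction l with
  | nil => simp
  | cons x tl ih =>
    have ih' := ih (fun y hy hp => h y (List.mem_cons_of_mem _ hy) hp)
    simp only [List.map_cons, List.sum_cons, List.countP_cons, ih']
    by_cases hp : p x
    · simp [hp, h x (List.mem_cons_self) hp]; ring
    · simp [hp]

theorem pv_sum_map_sub {α : Type} (l : List α) (f g : α → Int) :
    (l.map (fun x => f x - g x)).sum = (l.map f).sum - (l.map g).sum := by
  induction l with
  | nil => simp
  | cons x tl ih => simp [ih]; ring

theorem pv_sum_map_const_sub {α : Type} (l : List α) (f : α → Int) (c : Int) :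
    (l.map (fun x => f x - c)).sum = (l.map f).sum - (l.length : Int) * c := by
  rw [pv_sum_map_sub]
  simp [List.map_const']

theorem pv_sum_swap {α β : Type} (l : List α) (r : List β) (g : α → β → Int) :
    (l.map (fun x => (r.map (g x)).sum)).sum = (r.map (fun b => (l.map (fun x => g x b)).sum)).sum := by
  induction l with
  | nil => simp
  | cons x tl ih =>
    simp only [List.map_cons, List.sum_cons, ih]
    have : ∀ (r' : List β), (r'.map (fun b => g x b + (tl.map (fun y => g y b)).sum)).sum
        = (r'.map (g x)).sum + (r'.map (fun b => (tl.map (fun y => g y b)).sum)).sum := by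
      intro r'
      induction r' with
      | nil => simp
      | cons b rt ihr => simp only [List.map_cons, List.sum_cons, ihr]; ring
    rw [this]

-- canonical dicts have unique keys
theorem pv_nodup_keys (l : List (String × String)) : (pvToDict l).keys.Nodup := by
  unfold pvToDict
  exact PySem.Dict.nodup_keys_foldl_insert_key l Prod.fst (fun d p => p.2) _
    (by simp [PySem.Dict.keys_empty])

theorem pv_items_nodup (x : PySem.Dict String String) (hx : x.keys.Nodup) : x.items.Nodup := by
  have : (x.items.map (·.1)).Nodup := hx
  exact List.Nodup.of_map _ this

-- equal sort keys means permuted item lists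
theorem pv_perm_of_skey_eq (d1 d : PySem.Dict String String) (h : pvSKey d1 = pvSKey d) :
    d1.items.Perm d.items := by
  have p1 := PySem.List.sorted2_perm d1.items Prod.fst Prod.snd false
  have p2 := PySem.List.sorted2_perm d.items Prod.fst Prod.snd false
  exact (p1.symm.trans (by rw [pvSKey] at h; rw [h]; exact p2))

theorem pv_match_congr (d1 d x : PySem.Dict String String) (h : pvSKey d1 = pvSKey d) :
    pvMatch d1 x = pvMatch d x := by
  unfold pvMatch
  rw [(pv_perm_of_skey_eq d1 d h).countP_eq]

-- match of d against x = sum over d's items of the count of that pair in x's items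
theorem pv_match_counts (d x : PySem.Dict String String) (hx : x.keys.Nodup) :
    pvMatch d x = (d.items.map (fun kv => ((x.items.count kv : Nat) : Int))).sum := by
  unfold pvMatch
  rw [← PySem.List.sum_map_ite_one_zero (fun p => x.get? p.1 == some p.2) d.items]
  congr 1
  apply List.map_congr_left
  intro kv _
  have hnd := pv_items_nodup x hx
  by_cases hm : kv ∈ x.items
  · have hg : x.get? kv.1 = some kv.2 := by
      rw [PySem.Dict.get?_eq_some_iff_mem_items _ _ _ hx]; simpa using hm
    simp [hg, List.count_eq_one_of_mem hnd hm]
  · have hg : ¬ x.get? kv.1 = some kv.2 := by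
      intro h
      exact hm (by simpa using (PySem.Dict.get?_eq_some_iff_mem_items _ _ _ hx).1 h)
    simp [hg, List.count_eq_zero.mpr hm]

theorem pv_match_self (d x : PySem.Dict String String) (hx : x.keys.Nodup)
    (h : pvSKey d = pvSKey x) : pvMatch d x = (d.items.length : Int) := by
  unfold pvMatch
  have hperm := pv_perm_of_skey_eq d x h
  have : d.items.countP (fun p => x.get? p.1 == some p.2) = d.items.length := by
    rw [List.countP_eq_length]
    intro p hp
    have hpm : p ∈ x.items := hperm.mem_iff.mp hp
    have : x.get? p.1 = some p.2 := by
      rw [PySem.Dict.get?_eq_some_iff_mem_items _ _ _ hx]; simpa using hpm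
    simpa using this
  rw [this]

-- B's mult dict holds the multiplicity of each sort key
theorem pv_mult_val (ds : List (PySem.Dict String String)) (t : List (String × String)) :
    (ds.foldl (fun m d => m.insert (pvSKey d) (m.getD (pvSKey d) 0 + 1))
        (PySem.Dict.empty : PySem.Dict (List (String × String)) Int)).getD t 0
      = (((ds.map pvSKey).count t : Nat) : Int) := by
  rw [show (ds.foldl (fun m d => m.insert (pvSKey d) (m.getD (pvSKey d) 0 + 1))
        (PySem.Dict.empty : PySem.Dict (List (String × String)) Int))
      = ((ds.map pvSKey).foldl (fun m k => m.insert k (m.getD k 0 + 1)) PySem.Dict.empty) from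
      (List.foldl_map (f := pvSKey) (g := fun (m : PySem.Dict (List (String × String)) Int) k => m.insert k (m.getD k 0 + 1))
        (l := ds) (init := PySem.Dict.empty)).symm]
  rw [PySem.Dict.getD_foldl_insert_add_one]
  simp [PySem.Dict.getD_empty]

theorem pv_count_map_skey (ds : List (PySem.Dict String String)) (d : PySem.Dict String String) :
    (ds.map pvSKey).count (pvSKey d) = ds.countP (fun x => decide (pvSKey d = pvSKey x)) := by
  rw [List.count_eq_countP, List.countP_map]
  apply List.countP_congr
  intro x _
  by_cases hxe : pvSKey x = pvSKey d
  · simp [Function.comp, hxe]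
  · have hne : ¬ (pvSKey d = pvSKey x) := fun h => hxe h.symm
    simp [Function.comp, hxe, hne]

-- nested item fold = fold over the flattened items
theorem pv_foldl_flatMap {α β γ : Type} (g : α → List β) (step : γ → β → γ) :
    ∀ (l : List α) (a : γ),
    l.foldl (fun a x => (g x).foldl step a) a = (l.flatMap g).foldl step a := by
  intro l
  induction l with
  | nil => intro a; simp
  | cons x tl ih => intro a; simp [List.foldl_append, ih]

theorem pv_freq_val (ds : List (PySem.Dict String String)) (kv : String × String) :
    (ds.foldl (fun f d => d.items.foldl (fun f kv => f.insert kv (f.getD kv 0 + 1)) f)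
        (PySem.Dict.empty : PySem.Dict (String × String) Int)).getD kv 0
      = (((ds.flatMap (·.items)).count kv : Nat) : Int) := by
  have h := pv_foldl_flatMap (γ := PySem.Dict (String × String) Int)
    (fun (x : PySem.Dict String String) => x.items)
    (fun f kv => f.insert kv (f.getD kv 0 + 1)) ds PySem.Dict.empty
  rw [h]
  rw [PySem.Dict.getD_foldl_insert_add_one]
  simp [PySem.Dict.getD_empty]

theorem pv_count_flatMap {α β : Type} [BEq β] (g : α → List β) (a : β) :
    ∀ (l : List α),
    (((l.flatMap g).count a : Nat) : Int) = (l.map (fun x => (((g x).count a : Nat) : Int))).sum := by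
  intro l
  induction l with
  | nil => simp
  | cons x tl ih => simp [List.count_append, ih]

theorem pv_key_eq (ds : List (PySem.Dict String String))
    (hnd : ∀ x ∈ ds, x.keys.Nodup) (d : PySem.Dict String String) :
    (ds.foldl (fun cd d1 =>
        ds.foldl (fun cd d2 => if pvSKey d1 == pvSKey d2 then cd
          else if !cd.contains (pvSKey d1) then cd.insert (pvSKey d1) (pvMatch d1 d2)
          else cd.modify (pvSKey d1) 0 (· + pvMatch d1 d2)) cd)
      (PySem.Dict.empty : PySem.Dict (List (String × String)) Int)).getD (pvSKey d) 0
    = (ds.foldl (fun m x => m.insert (pvSKey x) (m.getD (pvSKey x) 0 + 1))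
        (PySem.Dict.empty : PySem.Dict (List (String × String)) Int)).getD (pvSKey d) 0 *
      (d.items.map (fun kv =>
        (ds.foldl (fun f x => x.items.foldl (fun f kv => f.insert kv (f.getD kv 0 + 1)) f)
          (PySem.Dict.empty : PySem.Dict (String × String) Int)).getD kv 0
        - (ds.foldl (fun m x => m.insert (pvSKey x) (m.getD (pvSKey x) 0 + 1))
            (PySem.Dict.empty : PySem.Dict (List (String × String)) Int)).getD (pvSKey d) 0)).sum := by
  rw [pv_outer ds (pvSKey d) ds PySem.Dict.empty]
  rw [pv_mult_val, pv_count_map_skey]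
  simp only [pv_freq_val, pv_count_flatMap]
  rw [PySem.Dict.getD_empty, zero_add]
  -- left side: the if-sum is M * pvS ds d
  have hconst : ∀ d1 ∈ ds, pvSKey d = pvSKey d1 → pvS ds d1 = pvS ds d := by
    intro d1 _ h
    unfold pvS
    apply congrArg
    apply List.map_congr_left
    intro x _
    rw [pv_match_congr d1 d x h.symm, h]
  rw [pv_sum_ite_const ds (fun d1 => pvSKey d = pvSKey d1) (pvS ds) (pvS ds d) hconst]
  -- right side: split off the constant M
  rw [pv_sum_map_const_sub]
  -- compute pvS ds d
  have hS : pvS ds d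
      = (d.items.map (fun kv => (ds.map (fun x => ((x.items.count kv : Nat) : Int))).sum)).sum
        - ((ds.countP (fun x => decide (pvSKey d = pvSKey x)) : Nat) : Int) * (d.items.length : Int) := by
    unfold pvS
    have h1 : ∀ x ∈ ds, (if pvSKey d == pvSKey x then (0:Int) else pvMatch d x)
        = pvMatch d x - (if pvSKey d = pvSKey x then pvMatch d x else 0) := by
      intro x _
      by_cases h : pvSKey d = pvSKey x
      · simp [h]
      · simp [h]
    rw [List.map_congr_left h1, pv_sum_map_sub]
    have h2 : ∀ x ∈ ds, (if pvSKey d = pvSKey x then pvMatch d x else 0)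
        = (if pvSKey d = pvSKey x then (d.items.length : Int) else 0) := by
      intro x hx
      by_cases h : pvSKey d = pvSKey x
      · simp only [h, if_true]; exact pv_match_self d x (hnd x hx) h
      · simp [h]
    rw [List.map_congr_left h2]
    rw [pv_sum_ite_const ds (fun x => pvSKey d = pvSKey x) (fun _ => (d.items.length : Int))
      (d.items.length : Int) (fun x _ _ => rfl)]
    rw [List.map_congr_left (fun x hx => pv_match_counts d x (hnd x hx))]
    rw [pv_sum_swap ds d.items (fun x kv => ((x.items.count kv : Nat) : Int))]
  rw [hS]
  ring

theorem pv_insertBy_congr {α : Type} (b1 b2 : α → α → Bool) (x : α) :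
    ∀ (ys : List α), (∀ y ∈ ys, b1 x y = b2 x y) →
    PySem.List.insertBy b1 x ys = PySem.List.insertBy b2 x ys := by
  intro ys
  induction ys with
  | nil => intro _; rfl
  | cons y t ih =>
    intro h
    simp only [PySem.List.insertBy]
    rw [h y (List.mem_cons_self)]
    rcases hb : b2 x y with _ | _
    · simp only [Bool.false_eq_true, if_false]
      rw [ih (fun z hz => h z (List.mem_cons_of_mem _ hz))]
    · simp

theorem pv_sorted_congr {α κ : Type} [LT κ] [DecidableLT κ] (xs : List α) (k1 k2 : α → κ)
    (h : ∀ x ∈ xs, k1 x = k2 x) :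
    PySem.List.sorted xs k1 false = PySem.List.sorted xs k2 false := by
  rw [show PySem.List.sorted xs k1 false = PySem.List.sorted xs k1 from rfl,
      show PySem.List.sorted xs k2 false = PySem.List.sorted xs k2 from rfl,
      PySem.List.sorted_eq_foldl_insertBy, PySem.List.sorted_eq_foldl_insertBy]
  suffices H : ∀ (l acc : List α), (∀ x ∈ l, k1 x = k2 x) → (∀ y ∈ acc, k1 y = k2 y) →
      l.foldl (fun acc x => PySem.List.insertBy (fun a b => decide (k1 a < k1 b)) x acc) acc
        = l.foldl (fun acc x => PySem.List.insertBy (fun a b => decide (k2 a < k2 b)) x acc) acc by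
    exact H xs [] h (by simp)
  intro l
  induction l with
  | nil => intro acc _ _; rfl
  | cons x t ih =>
    intro acc hl hacc
    simp only [List.foldl_cons]
    have hx := hl x (List.mem_cons_self)
    have hins : PySem.List.insertBy (fun a b => decide (k1 a < k1 b)) x acc
        = PySem.List.insertBy (fun a b => decide (k2 a < k2 b)) x acc := by
      apply pv_insertBy_congr
      intro y hy
      rw [hx, hacc y hy]
    rw [hins]
    apply ih _ (fun z hz => hl z (List.mem_cons_of_mem _ hz))
    intro y hy
    rcases (PySem.List.mem_insertBy _ x y acc).1 hy with h1 | h1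
    · rw [h1]; exact hx
    · exact hacc y h1


-- canonical dicts (pvToDict images) all have unique keys
theorem pv_all_nodup (dicts : List (List (String × String))) :
    ∀ x ∈ dicts.map pvToDict, x.keys.Nodup := by
  intro x hx
  rcases List.mem_map.1 hx with ⟨l, _, rfl⟩
  exact pv_nodup_keys l

-- ===== VERDICT (by name: the statement is the Claim_ definition above) =====
theorem sort_dicts_spec : Claim_equal_sort_dicts := by
  unfold Claim_equal_sort_dicts
  intro dicts _ _
  unfold Spec_sort_dicts
  simp only [sort_dicts, sort_dicts_alt]
  apply congrArg
  apply pv_sorted_congr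
  intro d hd
  exact pv_key_eq (dicts.map pvToDict) (pv_all_nodup dicts) d
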